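-- pv_equiv track=rewrite | github.com/dawnbeen/c_formatter_42 | c_formatter_42/formatters/line_breaker.py | get_paren_depth
-- ===== SOURCE A (Python) =====
-- def get_paren_depth(s: str) -> int:
--     paren_depth = 0
--     is_surrounded_sq = False
--     is_surrounded_dq = False
--     for c in s:
--         if c == "'" and not is_surrounded_dq:
--             is_surrounded_sq = not is_surrounded_sq
--         elif c == '"' and not is_surrounded_sq:
--             is_surrounded_dq = not is_surrounded_dq
--         elif c == "(" and not is_surrounded_sq and not is_surrounded_dq:
--             paren_depth += 1
--         elif c == ")" and not is_surrounded_sq and not is_surrounded_dq: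
--             paren_depth -= 1
--
--     return paren_depth
-- ===== SOURCE B (Python) =====
-- def get_paren_depth(s: str) -> int:
--     # Skip-based scan: jump over each quoted span via str.find instead of
--     # carrying per-character quote flags.
--     depth = 0
--     i = 0
--     n = len(s)
--     while i < n:
--         c = s[i]
--         if c == "'" or c == '"':
--             j = s.find(c, i + 1)
--             i = n if j == -1 else j + 1
--         else:
--             if c == "(":
--                 depth += 1
--             elif c == ")":
--                 depth -= 1
--             i += 1
--     return depth
-- ===== Notes on version B (the rewrite author's own statement) =====
-- stated objective: alternative
-- what changed: Replaced the per-character state machine with two quote flags by a skip-based scan that jumps over each quoted span with str.find and counts parentheses only in the unquoted stretches.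
import Mathlib
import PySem

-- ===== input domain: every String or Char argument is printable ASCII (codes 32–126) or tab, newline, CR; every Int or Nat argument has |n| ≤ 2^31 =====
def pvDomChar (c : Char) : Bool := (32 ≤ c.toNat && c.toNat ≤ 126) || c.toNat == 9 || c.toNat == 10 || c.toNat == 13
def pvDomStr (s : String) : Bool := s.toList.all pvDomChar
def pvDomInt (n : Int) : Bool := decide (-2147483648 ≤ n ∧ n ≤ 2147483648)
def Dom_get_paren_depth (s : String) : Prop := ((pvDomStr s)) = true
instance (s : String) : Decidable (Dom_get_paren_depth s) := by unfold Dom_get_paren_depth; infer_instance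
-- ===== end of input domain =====

-- B replaces A's two-flag state machine by a scan that jumps past each quoted span; return values proved equal.

-- ===== PORT A =====
-- for c in s: update (paren_depth, is_surrounded_sq, is_surrounded_dq)
def pvGoA : List Char → Int → Bool → Bool → Int
  | [], d, _, _ => d
  | c :: rest, d, sq, dq =>
    if c = '\'' ∧ dq = false then pvGoA rest d (!sq) dq
    else if c = '"' ∧ sq = false then pvGoA rest d sq (!dq)
    else if c = '(' ∧ sq = false ∧ dq = false then pvGoA rest (d + 1) sq dq
    else if c = ')' ∧ sq = false ∧ dq = false then pvGoA rest (d - 1) sq dq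
    else pvGoA rest d sq dq

def get_paren_depth (s : String) : Int := pvGoA s.toList 0 false false

-- ===== PORT B =====
-- while i < n: on a quote, jump past its next occurrence (s.find ~ dropWhile + drop 1); else count.
def pvGoB : List Char → Int → Int
  | [], d => d
  | c :: rest, d =>
    if c = '\'' ∨ c = '"' then pvGoB ((rest.dropWhile (· ≠ c)).drop 1) d
    else if c = '(' then pvGoB rest (d + 1)
    else if c = ')' then pvGoB rest (d - 1)
    else pvGoB rest d
  termination_by l _ => l.length
  decreasing_by
  · have h1 : (rest.dropWhile (· ≠ c)).length ≤ rest.length := List.length_dropWhile_le _ _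
    have h2 : ((rest.dropWhile (· ≠ c)).drop 1).length ≤ (rest.dropWhile (· ≠ c)).length := by
      simp
    simp only [List.length_cons]; omega
  all_goals simp

def get_paren_depth_alt (s : String) : Int := pvGoB s.toList 0

-- ===== PRECONDITION & SPEC =====
def Spec_get_paren_depth (s : String) (out : Int) : Prop := out = get_paren_depth_alt s
instance (s : String) (out : Int) : Decidable (Spec_get_paren_depth s out) := by unfold Spec_get_paren_depth; infer_instance

-- ===== CLAIM (what is proved, stated in full; the proofs are below) =====
def Claim_equal_get_paren_depth : Prop := ∀ (s : String), Dom_get_paren_depth s → Spec_get_paren_depth s (get_paren_depth s)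

-- ===== LEMMAS AND PROOFS =====

-- Inside a single-quoted span A skips every character until the closing quote.
theorem pvGoA_sq (l : List Char) (d : Int) :
    pvGoA l d true false = pvGoA ((l.dropWhile (· ≠ '\'')).drop 1) d false false := by
  induction l with
  | nil => simp [pvGoA, List.dropWhile]
  | cons c rest ih =>
    by_cases h : c = '\''
    · subst h; simp [pvGoA, List.dropWhile]
    · simp [pvGoA, List.dropWhile, h, ih]

-- Inside a double-quoted span A skips every character until the closing quote.
theorem pvGoA_dq (l : List Char) (d : Int) :
    pvGoA l d false true = pvGoA ((l.dropWhile (· ≠ '"')).drop 1) d false false := by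
  induction l with
  | nil => simp [pvGoA, List.dropWhile]
  | cons c rest ih =>
    by_cases h : c = '"'
    · subst h; simp [pvGoA, List.dropWhile]
    · simp [pvGoA, List.dropWhile, h, ih]

theorem pvGoA_eq_pvGoB (n : ℕ) :
    ∀ l : List Char, l.length ≤ n → ∀ d : Int, pvGoA l d false false = pvGoB l d := by
  induction n with
  | zero =>
    intro l h d
    have : l = [] := List.eq_nil_of_length_eq_zero (Nat.le_zero.mp h)
    subst this; simp [pvGoA, pvGoB]
  | succ n ih =>
    intro l h d
    match l with
    | [] => simp [pvGoA, pvGoB]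
    | c :: rest =>
      simp only [List.length_cons, Nat.succ_le_succ_iff] at h
      by_cases hs : c = '\''
      · subst hs
        rw [show pvGoA ('\'' :: rest) d false false = pvGoA rest d true false by
              simp [pvGoA], pvGoA_sq]
        rw [show pvGoB ('\'' :: rest) d = pvGoB ((rest.dropWhile (· ≠ '\'')).drop 1) d by
              simp [pvGoB]]
        exact ih _ (by
          have h1 : (rest.dropWhile (· ≠ '\'')).length ≤ rest.length := List.length_dropWhile_le _ _
          have h2 : ((rest.dropWhile (· ≠ '\'')).drop 1).length ≤ (rest.dropWhile (· ≠ '\'')).length := by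
            simp
          omega) d
      · by_cases hd : c = '"'
        · subst hd
          rw [show pvGoA ('"' :: rest) d false false = pvGoA rest d false true by
                simp [pvGoA], pvGoA_dq]
          rw [show pvGoB ('"' :: rest) d = pvGoB ((rest.dropWhile (· ≠ '"')).drop 1) d by
                simp [pvGoB]]
          exact ih _ (by
            have h1 : (rest.dropWhile (· ≠ '"')).length ≤ rest.length := List.length_dropWhile_le _ _
            have h2 : ((rest.dropWhile (· ≠ '"')).drop 1).length ≤ (rest.dropWhile (· ≠ '"')).length := by
              simp
            omega) d
        · by_cases hp : c = '('
          · subst hp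
            simpa [pvGoA, pvGoB] using ih rest h (d + 1)
          · by_cases hq : c = ')'
            · subst hq
              simpa [pvGoA, pvGoB] using ih rest h (d - 1)
            · simpa [pvGoA, pvGoB, hs, hd, hp, hq] using ih rest h d

-- ===== VERDICT (by name: the statement is the Claim_ definition above) =====
theorem get_paren_depth_spec : Claim_equal_get_paren_depth := by
  intro s _
  unfold Spec_get_paren_depth get_paren_depth get_paren_depth_alt
  exact pvGoA_eq_pvGoB s.toList.length s.toList (le_refl _) 0
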